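-- pv_equiv track=rewrite | github.com/slothgsr/Xword | multiplerxword/playground.py | combo_generator
-- ===== SOURCE A (Python) =====
-- import string
--
-- def combo_generator(Gridlist):
--     letterdic = dict.fromkeys(string.ascii_lowercase, 0)
--     for grid in Gridlist:
--         for word in grid:
--             for letter in word:
--                 if letter in letterdic:
--                     letterdic[letter] += 1
--                 else:
--                     letterdic[letter] = 1
--     unused =[k for k,v in letterdic.items() if v == 0]
--     return unused
-- ===== SOURCE B (Python) =====
-- import string
--
-- def combo_generator(Gridlist):
--     return [c for c in string.ascii_lowercase
--             if not any(c in word for grid in Gridlist for word in grid)]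
-- ===== Notes on version B (the rewrite author's own statement) =====
-- stated objective: simpler
-- what changed: B drops the frequency dictionary entirely: it iterates the 26 alphabet letters and keeps each letter whose membership test fails on every grid word (letter-outer scan with early exit, no counts maintained).
import Mathlib
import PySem

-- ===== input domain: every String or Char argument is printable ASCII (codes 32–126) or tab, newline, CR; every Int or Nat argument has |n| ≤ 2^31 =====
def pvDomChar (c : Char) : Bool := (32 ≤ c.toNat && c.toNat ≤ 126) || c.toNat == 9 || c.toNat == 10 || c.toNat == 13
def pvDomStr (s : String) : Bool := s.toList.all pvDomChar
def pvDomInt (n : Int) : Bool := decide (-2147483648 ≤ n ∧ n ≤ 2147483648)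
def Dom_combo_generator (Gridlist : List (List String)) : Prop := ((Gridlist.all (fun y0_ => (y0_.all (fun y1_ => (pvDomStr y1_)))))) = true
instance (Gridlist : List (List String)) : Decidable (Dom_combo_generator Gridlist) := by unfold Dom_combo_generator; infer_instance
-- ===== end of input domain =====

-- B replaces A's frequency dictionary with a direct letter-outer scan: for each of the
-- 26 alphabet letters, test membership in every grid word; no counts are maintained.
-- Python dict keys are 1-char strings; ported as Char with String.ofList [·] at the output.

-- ===== PORT A =====
def pvAsciiLowercase : List Char := "abcdefghijklmnopqrstuvwxyz".toList

def combo_generator (Gridlist : List (List String)) : List String :=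
  -- letterdic = dict.fromkeys(string.ascii_lowercase, 0)
  let letterdic : PySem.Dict Char Int :=
    pvAsciiLowercase.foldl (fun d c => d.insert c 0) PySem.Dict.empty
  -- for grid in Gridlist: for word in grid: for letter in word: …
  let d : PySem.Dict Char Int :=
    Gridlist.foldl (fun d grid =>
      grid.foldl (fun d word =>
        word.toList.foldl (fun d letter =>
          if d.contains letter then d.modify letter 0 (fun x => x + 1)
          else d.insert letter 1) d) d) letterdic
  -- unused = [k for k,v in letterdic.items() if v == 0]
  (d.items.filter (fun kv => kv.2 == 0)).map (fun kv => String.ofList [kv.1])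

-- ===== PORT B =====
def combo_generator_alt (Gridlist : List (List String)) : List String :=
  -- [c for c in string.ascii_lowercase if not any(c in word for grid in Gridlist for word in grid)]
  (pvAsciiLowercase.filter (fun c =>
      !(Gridlist.any (fun grid =>
          grid.any (fun word => PySem.Str.isIn (String.ofList [c]) word))))).map
    (fun c => String.ofList [c])

-- ===== PRECONDITION & SPEC =====
def Spec_combo_generator (Gridlist : List (List String)) (out : List String) : Prop := out = combo_generator_alt Gridlist
instance (Gridlist : List (List String)) (out : List String) : Decidable (Spec_combo_generator Gridlist out) := by unfold Spec_combo_generator; infer_instance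

-- ===== CLAIM (what is proved, stated in full; the proofs are below) =====
def Claim_equal_combo_generator : Prop := ∀ (Gridlist : List (List String)), Dom_combo_generator Gridlist → Spec_combo_generator Gridlist (combo_generator Gridlist)

-- ===== LEMMAS AND PROOFS =====

-- all characters of the grid, in iteration order
def pvAllChars (Gridlist : List (List String)) : List Char :=
  Gridlist.flatMap (fun grid => grid.flatMap (fun word => word.toList))

-- A's loop body is exactly a counting modify (the two branches of the if agree with modify)
theorem pv_step_eq (d : PySem.Dict Char Int) (c : Char) :
    (if d.contains c then d.modify c 0 (fun x => x + 1) else d.insert c 1)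
      = d.modify c 0 (fun x => x + 1) := by
  by_cases h : d.contains c
  · simp [h]
  · simp only [PySem.Dict.modify]
    rw [if_neg h, PySem.Dict.getD_of_not_contains d 0 (by simpa using h)]
    norm_num

-- the triple nested fold is the counting fold over the flattened character list
theorem pv_fold_flatten {α : Type} (f : α → Char → α) (Gridlist : List (List String)) (d : α) :
    Gridlist.foldl (fun d grid =>
      grid.foldl (fun d word => word.toList.foldl f d) d) d
    = (pvAllChars Gridlist).foldl f d := by
  induction Gridlist generalizing d with
  | nil => simp [pvAllChars]
  | cons grid rest ih =>
    simp only [pvAllChars, List.flatMap_cons, List.foldl_append, List.foldl_cons] at *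
    rw [ih]
    congr 1
    induction grid generalizing d with
    | nil => simp
    | cons w ws ihw => simp only [List.flatMap_cons, List.foldl_append, List.foldl_cons, ihw]

-- the if-branches of A's loop body collapse to a counting modify
theorem pv_fold_step (L : List Char) (d : PySem.Dict Char Int) :
    L.foldl (fun d letter =>
      if d.contains letter then d.modify letter 0 (fun x => x + 1)
      else d.insert letter 1) d
    = L.foldl (fun d c => d.modify c 0 (fun x => x + 1)) d := by
  have : (fun (d : PySem.Dict Char Int) letter =>
      if d.contains letter then d.modify letter 0 (fun x => x + 1)
      else d.insert letter 1) = fun d c => d.modify c 0 (fun x => x + 1) := by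
    funext d c; exact pv_step_eq d c
  rw [this]

-- the initial dict has items (c, 0) over the alphabet
theorem pv_init_items :
    (pvAsciiLowercase.foldl (fun d c => d.insert c 0) (PySem.Dict.empty : PySem.Dict Char Int)).items
      = pvAsciiLowercase.map (fun c => (c, (0 : Int))) := by
  have h := PySem.Dict.items_foldl_insert_fresh (ν := Int) pvAsciiLowercase (fun c => c)
    (fun _ => (0 : Int)) PySem.Dict.empty (by intro a _; simp [PySem.Dict.contains_empty])
    (by simpa using (by decide : pvAsciiLowercase.Nodup))
  simpa using h

theorem pv_init_keys :
    (pvAsciiLowercase.foldl (fun d c => d.insert c 0) (PySem.Dict.empty : PySem.Dict Char Int)).keys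
      = pvAsciiLowercase := by
  simp only [PySem.Dict.keys, pv_init_items, List.map_map, Function.comp_def]
  exact List.map_id _

-- the initial dict maps every character to 0
theorem pv_init_getD (c : Char) :
    (pvAsciiLowercase.foldl (fun d c => d.insert c 0) (PySem.Dict.empty : PySem.Dict Char Int)).getD c 0 = 0 := by
  by_cases h : c ∈ pvAsciiLowercase
  · exact PySem.Dict.getD_of_mem_items _
      (by rw [pv_init_items]; exact List.mem_map.2 ⟨c, h, rfl⟩)
      (by rw [pv_init_keys]; decide) 0
  · refine PySem.Dict.getD_of_not_contains _ 0 ?_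
    rw [PySem.Dict.contains_eq_decide_mem_keys, pv_init_keys]
    simpa using h

theorem combo_generator_spec : Claim_equal_combo_generator := by
  intro Gridlist _
  show combo_generator Gridlist = combo_generator_alt Gridlist
  simp only [combo_generator, combo_generator_alt]
  rw [pv_fold_flatten, pv_fold_step]
  set L := pvAllChars Gridlist with hL
  set d0 := pvAsciiLowercase.foldl (fun d c => d.insert c 0) (PySem.Dict.empty : PySem.Dict Char Int) with hd0
  set d := L.foldl (fun d c => d.modify c 0 (fun x => x + 1)) d0 with hd
  -- the final dict's lookups are occurrence counts
  have hget : ∀ c, d.getD c 0 = (L.count c : Int) := by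
    intro c
    rw [hd, PySem.Dict.getD_foldl_modify_add_one, pv_init_getD]
    ring
  -- its keys: the alphabet followed by the fresh characters
  have hkeys : d.keys = pvAsciiLowercase
      ++ (PySem.Set.ofList L).filter (fun y => !(PySem.Set.contains pvAsciiLowercase y)) := by
    rw [hd]
    have h := PySem.Dict.keys_foldl_modify (ν := Int) L 0 (fun _ _ v => v + 1) d0
    rw [h, pv_init_keys, PySem.Set.update_eq_append_filter]
  have hnodup : d.keys.Nodup := by
    rw [hd]
    exact PySem.Dict.nodup_keys_foldl_modify_key L (fun c => c) 0 (fun _ _ v => v + 1) d0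
      (by rw [pv_init_keys]; decide)
  -- characters occur in L iff some word contains them
  have hmem : ∀ c, c ∈ L ↔
      (Gridlist.any (fun grid =>
        grid.any (fun word => PySem.Str.isIn (String.ofList [c]) word))) = true := by
    intro c
    simp only [hL, pvAllChars, List.mem_flatMap, List.any_eq_true,
      PySem.Str.isIn_iff_infix, String.toList_ofList, List.singleton_infix_iff]
  -- rewrite A's items as a map over the keys
  rw [PySem.Dict.items_eq_map_keys d hnodup 0, List.filter_map, List.map_map, hkeys,
    List.filter_append]
  -- filter drops every fresh key (its count is positive)
  have hextras : ((PySem.Set.ofList L).filter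
      (fun y => !(PySem.Set.contains pvAsciiLowercase y))).filter
        ((fun kv => kv.2 == 0) ∘ fun k => (k, d.getD k 0)) = [] := by
    rw [List.filter_eq_nil_iff]
    intro c hc
    have hcL : c ∈ L := by
      have := List.mem_filter.1 hc
      exact (PySem.Set.mem_ofList _ _).1 this.1
    simp only [Function.comp, hget, beq_iff_eq, Int.natCast_eq_zero]
    exact fun h => (List.count_pos_iff.2 hcL).ne' (by exact_mod_cast h)
  rw [hextras, List.append_nil]
  -- on the alphabet the two filter predicates agree
  have hfilter : pvAsciiLowercase.filter ((fun kv => kv.2 == 0) ∘ fun k => (k, d.getD k 0))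
      = pvAsciiLowercase.filter (fun c =>
          !(Gridlist.any (fun grid =>
            grid.any (fun word => PySem.Str.isIn (String.ofList [c]) word)))) := by
    apply List.filter_congr
    intro c _
    by_cases h : c ∈ L
    · have hany := (hmem c).1 h
      have hcnt : L.count c ≠ 0 := (List.count_pos_iff.2 h).ne'
      simp only [PySem.Str.isIn_eq, String.toList_ofList] at hany
      simp [Function.comp, hget, hany, hcnt]
    · have hany : (Gridlist.any fun grid =>
          grid.any fun word => PySem.Str.isIn (String.ofList [c]) word) = false := by
        rw [Bool.eq_false_iff]
        exact fun hh => h ((hmem c).2 hh)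
      simp only [PySem.Str.isIn_eq, String.toList_ofList] at hany
      simp [Function.comp, hget, hany, List.count_eq_zero.2 h]
  rw [hfilter]
  simp
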